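-- pv_equiv track=rewrite | github.com/ParkieV/lct2024 | api/src/services/text_service.py | replace_commas
-- ===== SOURCE A (Python) =====
-- def replace_commas(text):
--     '''Удалить все запятые, кроме тех, которые разделяют числа (например 1,5 (полтора))
--
--     Выход:
--         text: текст без ненужных запятых
--     '''
--
--     digits = '0123456789'
--
--     if text[0] == ',':
--          text = text[1:]
--
--     if text[-1] == ',':
--          text = text[:-1]
--
--     if (',' in text):
--
--         parts = text.split(',')
--         for i in range(len(parts) - 1):
--             if( parts[i] and parts[i+1]) and (parts[i][-1] in digits) and (parts[i+1][0] in digits):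
--                 parts[i] += ','
--             else:
--                 parts[i] += ' '
--
--         return ''.join(parts)
--
--     else:
--          return text
-- ===== SOURCE B (Python) =====
-- def replace_commas(text):
--     '''Удалить все запятые, кроме тех, которые разделяют числа (например 1,5 (полтора))
--
--     Выход:
--         text: текст без ненужных запятых
--     '''
--
--     if text[0] == ',':
--         text = text[1:]
--
--     if text[-1] == ',':
--         text = text[:-1]
--
--     digits = '0123456789'
--     out = []
--     for i, c in enumerate(text):
--         if c == ',' and 0 < i and text[i - 1] in digits and i + 1 < len(text) and text[i + 1] in digits:
--             out.append(',')
--         elif c == ',':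
--             out.append(' ')
--         else:
--             out.append(c)
--     return ''.join(out)
-- ===== Notes on version B (the rewrite author's own statement) =====
-- stated objective: simpler
-- what changed: Replaces A's split-on-comma / index-loop over adjacent parts / rejoin with a single left-to-right pass over the characters that keeps a comma only when its immediate neighbours are both digits.
-- outside the precondition, e.g. on replace_commas(''): A raises IndexError, B raises IndexError; on replace_commas(','): A raises IndexError, B raises IndexError
import Mathlib
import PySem

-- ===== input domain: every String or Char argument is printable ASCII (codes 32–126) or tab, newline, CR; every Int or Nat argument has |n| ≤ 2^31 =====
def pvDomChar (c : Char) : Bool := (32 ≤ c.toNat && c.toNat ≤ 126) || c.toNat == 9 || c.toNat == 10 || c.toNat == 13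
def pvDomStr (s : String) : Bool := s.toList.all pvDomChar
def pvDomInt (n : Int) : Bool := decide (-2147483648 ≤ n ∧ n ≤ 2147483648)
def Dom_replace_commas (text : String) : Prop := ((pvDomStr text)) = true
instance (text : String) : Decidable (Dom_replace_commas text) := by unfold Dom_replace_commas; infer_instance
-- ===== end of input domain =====

-- B replaces A's split-on-comma / index-loop over adjacent parts / rejoin by one left-to-right pass that keeps a comma only between two digits (same O(n) cost, simpler shape).

-- ===== PORT A =====
-- body of A's 'for i in range(len(parts) - 1)' loop
def pvLoopBodyA (ps : List (List Char)) (i : Int) : List (List Char) :=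
  let pi := PySem.List.pyGetD ps i []
  let pj := PySem.List.pyGetD ps (i + 1) []
  if pi ≠ [] ∧ pj ≠ [] ∧ (PySem.List.pyGet? pi (-1)).any (fun c => c ∈ "0123456789".toList) ∧
      (PySem.List.pyGet? pj 0).any (fun c => c ∈ "0123456789".toList)
  then PySem.List.pySetD ps i (pi ++ [','])
  else PySem.List.pySetD ps i (pi ++ [' '])

def replace_commas (text : String) : String :=
  let s0 := text.toList
  let s1 := if PySem.List.pyGet? s0 0 = some ',' then PySem.List.slice s0 (some 1) none else s0
  let s2 := if PySem.List.pyGet? s1 (-1) = some ',' then PySem.List.slice s1 none (some (-1)) else s1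
  if ',' ∈ s2 then
    let parts := PySem.Chars.splitOn s2 [',']
    let parts := (PySem.List.pyRange 0 ((parts.length : Int) - 1) 1).foldl pvLoopBodyA parts
    String.ofList (PySem.Chars.join [] parts)
  else
    String.ofList s2

-- ===== PORT B =====
-- body of B's 'for i, c in enumerate(text)' loop
def pvLoopBodyB (s : List Char) (out : List Char) (ic : Int × Char) : List Char :=
  if ic.2 = ',' ∧ 0 < ic.1 ∧ (PySem.List.pyGet? s (ic.1 - 1)).any (fun c => c ∈ "0123456789".toList) ∧
      ic.1 + 1 < (s.length : Int) ∧ (PySem.List.pyGet? s (ic.1 + 1)).any (fun c => c ∈ "0123456789".toList)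
  then out ++ [',']
  else if ic.2 = ',' then out ++ [' '] else out ++ [ic.2]

def replace_commas_alt (text : String) : String :=
  let s0 := text.toList
  let s1 := if PySem.List.pyGet? s0 0 = some ',' then PySem.List.slice s0 (some 1) none else s0
  let s2 := if PySem.List.pyGet? s1 (-1) = some ',' then PySem.List.slice s1 none (some (-1)) else s1
  String.ofList ((PySem.List.enumerate s2).foldl (pvLoopBodyB s2) [])

-- ===== PRECONDITION & SPEC =====
-- Pre_ excludes exactly "" and ",", on which the Python A (and likewise B) raises IndexError at the text[0]/text[-1] guards.
def Pre_replace_commas (text : String) : Prop := text ≠ "" ∧ text ≠ ","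
instance (text : String) : Decidable (Pre_replace_commas text) := by unfold Pre_replace_commas; infer_instance
def pvWitness_replace_commas : String := "ab,cd 1,5,"
def Spec_replace_commas (text : String) (out : String) : Prop := out = replace_commas_alt text
instance (text : String) (out : String) : Decidable (Spec_replace_commas text out) := by unfold Spec_replace_commas; infer_instance

-- ===== CLAIM (what is proved, stated in full; the proofs are below) =====
def Claim_equal_replace_commas : Prop := ∀ (text : String), Dom_replace_commas text → Pre_replace_commas text → Spec_replace_commas text (replace_commas text)

-- ===== LEMMAS AND PROOFS =====

-- digit test on an optional character ('' / missing neighbour tests false)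
def pvDig (o : Option Char) : Bool := o.any (fun c => c ∈ "0123456789".toList)

-- the separator A writes between two adjacent parts
def pvSep (p q : List Char) : Char := if pvDig p.getLast? ∧ pvDig q.head? then ',' else ' '

-- s.split(',') as a structural recursion
def pvSplit1 : List Char → List (List Char)
  | [] => [[]]
  | c :: rest => if c = ',' then [] :: pvSplit1 rest else (pvSplit1 rest).modifyHead (c :: ·)

-- A's loop result, structurally
def pvDec : List (List Char) → List (List Char)
  | [] => []
  | [p] => [p]
  | p :: q :: rest => (p ++ [pvSep p q]) :: pvDec (q :: rest)

-- B's pass, as a recursion carrying the previous character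
def pvNmap (a : Option Char) : List Char → List Char
  | [] => []
  | c :: cs => (if c = ',' then (if pvDig a ∧ pvDig cs.head? then ',' else ' ') else c) :: pvNmap (some c) cs

-- ','.join inverse of split
def pvGlue : List (List Char) → List Char
  | [] => []
  | [p] => p
  | p :: q :: rest => p ++ ',' :: pvGlue (q :: rest)

-- the character B appends at position ic
def pvFB (s : List Char) (ic : Int × Char) : Char :=
  if ic.2 = ',' ∧ 0 < ic.1 ∧ (PySem.List.pyGet? s (ic.1 - 1)).any (fun c => c ∈ "0123456789".toList) ∧
      ic.1 + 1 < (s.length : Int) ∧ (PySem.List.pyGet? s (ic.1 + 1)).any (fun c => c ∈ "0123456789".toList)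
  then ',' else if ic.2 = ',' then ' ' else ic.2

theorem pvGet_neg_one {α : Type} (p : List α) : PySem.List.pyGet? p (-1) = p.getLast? := by
  cases p with
  | nil => simp [PySem.List.pyGet?, PySem.List.pyIdx?]
  | cons x xs => simp [PySem.List.pyGet?, PySem.List.pyIdx?, List.getLast?_eq_getElem?]

theorem pvGet_zero {α : Type} (p : List α) : PySem.List.pyGet? p 0 = p.head? := by
  simpa [List.head?_eq_getElem?] using PySem.List.pyGet?_natCast p 0

-- L1: B's fold is a map
theorem pvFoldB (s : List Char) :
    (PySem.List.enumerate s).foldl (pvLoopBodyB s) [] = (PySem.List.enumerate s).map (pvFB s) := by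
  have h : pvLoopBodyB s = fun out ic => out ++ [pvFB s ic] := by
    funext out ic
    unfold pvLoopBodyB pvFB
    split_ifs <;> rfl
  rw [h]
  simpa using PySem.List.foldl_append_singleton_eq_map (pvFB s) (PySem.List.enumerate s) []

-- L2 head case
theorem pvFB_head (pre : List Char) (c : Char) (cs : List Char) :
    pvFB (pre ++ c :: cs) ((pre.length : Int), c) =
      (if c = ',' then (if pvDig pre.getLast? ∧ pvDig cs.head? then ',' else ' ') else c) := by
  by_cases hc : c = ','
  · subst hc
    by_cases hpre : pre = []
    · subst hpre; simp [pvFB, pvDig]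
    · by_cases hcs : cs = []
      · subst hcs
        have e4 : ¬ ((pre.length : Int) + 1 < (((pre ++ [','] : List Char)).length : Int)) := by
          simp
        simp [pvFB, pvDig, e4]
      · have hl : 0 < pre.length := List.length_pos_iff.mpr hpre
        have hcl : 0 < cs.length := List.length_pos_iff.mpr hcs
        have e1 : PySem.List.pyGet? (pre ++ ',' :: cs) ((pre.length : Int) - 1) = pre.getLast? := by
          have hcast : ((pre.length : Int) - 1) = ((pre.length - 1 : Nat) : Int) := by omega
          rw [hcast, PySem.List.pyGet?_natCast, List.getElem?_append_left (by omega),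
            List.getLast?_eq_getElem?]
        have e2 : PySem.List.pyGet? (pre ++ ',' :: cs) ((pre.length : Int) + 1) = cs.head? := by
          have hcast : ((pre.length : Int) + 1) = ((pre.length + 1 : Nat) : Int) := by omega
          rw [hcast, PySem.List.pyGet?_natCast, List.getElem?_append_right (by omega)]
          simp [List.head?_eq_getElem?]
        have e3 : (0 : Int) < (pre.length : Int) := by exact_mod_cast hl
        have e4 : (pre.length : Int) + 1 < (((pre ++ ',' :: cs).length : Nat) : Int) := by
          simp; omega
        simp [pvFB, pvDig, e1, e2, e3, e4, hl, hcl]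
  · simp [pvFB, hc]

-- L2: the map is pvNmap
theorem pvEnumMap (suf : List Char) (pre : List Char) :
    (PySem.List.enumerate suf (pre.length : Int)).map (pvFB (pre ++ suf)) = pvNmap pre.getLast? suf := by
  induction suf generalizing pre with
  | nil => simp [PySem.List.enumerate_nil, pvNmap]
  | cons c cs ih =>
    rw [PySem.List.enumerate_cons, List.map_cons]
    have htail : (PySem.List.enumerate cs ((pre.length : Int) + 1)).map (pvFB (pre ++ c :: cs)) =
        pvNmap (some c) cs := by
      have hlen : (pre.length : Int) + 1 = (((pre ++ [c]).length : Nat) : Int) := by simp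
      have happ : pre ++ c :: cs = (pre ++ [c]) ++ cs := by simp
      rw [hlen, happ, ih (pre ++ [c]), List.getLast?_concat]
    rw [htail, pvFB_head]
    rfl

-- L3: splitOn is pvSplit1
theorem pvSplit1_ne_nil (s : List Char) : pvSplit1 s ≠ [] := by
  induction s with
  | nil => simp [pvSplit1]
  | cons c cs ih =>
    simp only [pvSplit1]
    split_ifs
    · simp
    · cases h : pvSplit1 cs with
      | nil => exact absurd h ih
      | cons p ps => simp [h, List.modifyHead]

def pvConsH (x : List Char) : List (List Char) → List (List Char)
  | [] => [x]
  | p :: ps => (x ++ p) :: ps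
theorem pvGo (fuel : Nat) (l cur : List Char) (acc : List (List Char)) (h : l.length ≤ fuel) :
    PySem.Chars.splitOn.go [','] fuel l cur acc = acc.reverse ++ pvConsH cur.reverse (pvSplit1 l) := by
  induction fuel generalizing l cur acc with
  | zero =>
    have : l = [] := by cases l <;> simp_all
    subst this
    rw [PySem.Chars.splitOn.go]
    simp [pvSplit1, pvConsH]
  | succ fuel ih =>
    cases l with
    | nil =>
      rw [PySem.Chars.splitOn.go]
      · simp [pvSplit1, pvConsH]
      · omega
    | cons c rest =>
      rw [PySem.Chars.splitOn.go]
      have hpre : [','].isPrefixOf (c :: rest) = (c = ',' : Bool) := by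
        simp [List.isPrefixOf]; exact BEq.comm
      by_cases hc : c = ','
      · subst hc
        simp only [hpre, decide_true, if_pos]
        rw [ih _ _ _ (by simpa using Nat.le_of_succ_le_succ (by simpa using h))]
        cases hsp : pvSplit1 rest with
        | nil => exact absurd hsp (pvSplit1_ne_nil rest)
        | cons p ps => simp [pvSplit1, pvConsH, hsp]
      · simp only [hpre, hc, decide_false, if_neg, Bool.false_eq_true, not_false_iff]
        rw [ih _ _ _ (by simpa using Nat.le_of_succ_le_succ (by simpa using h))]
        cases hsp : pvSplit1 rest with
        | nil => exact absurd hsp (pvSplit1_ne_nil rest)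
        | cons p ps => simp [pvSplit1, pvConsH, hsp, hc, List.modifyHead]
theorem pvSplitOn_eq (s : List Char) : PySem.Chars.splitOn s [','] = pvSplit1 s := by
  unfold PySem.Chars.splitOn
  rw [pvGo _ _ _ _ (by omega)]
  cases hsp : pvSplit1 s with
  | nil => exact absurd hsp (pvSplit1_ne_nil s)
  | cons p ps => simp [pvConsH]


theorem pvSplit1_no_comma (s : List Char) : ∀ p ∈ pvSplit1 s, ',' ∉ p := by
  induction s with
  | nil => simp [pvSplit1]
  | cons c cs ih =>
    simp only [pvSplit1]
    split_ifs with hc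
    · intro p hp
      rcases List.mem_cons.mp hp with h | h
      · simp [h]
      · exact ih p h
    · cases h : pvSplit1 cs with
      | nil => exact absurd h (pvSplit1_ne_nil cs)
      | cons q qs =>
        intro p hp
        rcases List.mem_cons.mp hp with h' | h'
        · subst h'
          have hq : ',' ∉ q := ih q (by simp [h])
          simp [List.mem_cons, not_or]
          exact ⟨fun e => hc e.symm, hq⟩
        · exact ih p (by simp [h, h'])

theorem pvGlue_split1 (s : List Char) : pvGlue (pvSplit1 s) = s := by
  induction s with
  | nil => rfl
  | cons c cs ih =>
    simp only [pvSplit1]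
    split_ifs with hc
    · subst hc
      cases h : pvSplit1 cs with
      | nil => exact absurd h (pvSplit1_ne_nil cs)
      | cons q qs => rw [h] at ih; simp [pvGlue, ih]
    · cases h : pvSplit1 cs with
      | nil => exact absurd h (pvSplit1_ne_nil cs)
      | cons q qs =>
        rw [h] at ih
        cases qs with
        | nil => simpa [pvGlue] using congrArg (c :: ·) ih
        | cons r rs => simpa [pvGlue, List.modifyHead] using congrArg (c :: ·) ih

-- partial decoration after k loop steps
def pvF (parts : List (List Char)) (k : Nat) : List (List Char) :=
  parts.mapIdx (fun i p => if i < k then p ++ [pvSep (parts.getD i []) (parts.getD (i + 1) [])] else p)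

theorem pvBodyA (ps : List (List Char)) (n : Nat) :
    pvLoopBodyA ps (n : Int) =
      ps.set n (ps.getD n [] ++ [pvSep (ps.getD n []) (ps.getD (n + 1) [])]) := by
  unfold pvLoopBodyA
  have g1 : PySem.List.pyGetD ps (n : Int) [] = ps.getD n [] := by
    simpa using PySem.List.pyGetD_natCast ps n []
  have g2 : PySem.List.pyGetD ps ((n : Int) + 1) [] = ps.getD (n + 1) [] := by
    have : ((n : Int) + 1) = ((n + 1 : Nat) : Int) := by omega
    rw [this]
    simpa using PySem.List.pyGetD_natCast ps (n + 1) []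
  have s1 : ∀ v, PySem.List.pySetD ps (n : Int) v = ps.set n v := by
    intro v; simpa using PySem.List.pySetD_natCast ps n v
  simp only [g1, g2, s1, pvGet_neg_one, pvGet_zero]
  have hAe : (ps.getD n []).getLast?.any (fun c => c ∈ "0123456789".toList) = pvDig (ps.getD n []).getLast? := rfl
  have hBe : (ps.getD (n + 1) []).head?.any (fun c => c ∈ "0123456789".toList) = pvDig (ps.getD (n + 1) []).head? := rfl
  by_cases hA : pvDig (ps.getD n []).getLast? = true
  · by_cases hB : pvDig (ps.getD (n + 1) []).head? = true
    · have hane : ps.getD n [] ≠ [] := by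
        intro he; rw [he] at hA; exact absurd hA (by simp [pvDig])
      have hbne : ps.getD (n + 1) [] ≠ [] := by
        intro he; rw [he] at hB; exact absurd hB (by simp [pvDig])
      rw [if_pos ⟨hane, hbne, by rw [hAe]; exact hA, by rw [hBe]; exact hB⟩]
      have hsep : pvSep (ps.getD n []) (ps.getD (n + 1) []) = ',' := by
        unfold pvSep; exact if_pos ⟨hA, hB⟩
      rw [hsep]
    · rw [if_neg (by rw [hAe, hBe]; tauto)]
      have hsep : pvSep (ps.getD n []) (ps.getD (n + 1) []) = ' ' := by
        unfold pvSep; exact if_neg (fun hab => hB hab.2)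
      rw [hsep]
  · rw [if_neg (by rw [hAe, hBe]; tauto)]
    have hsep : pvSep (ps.getD n []) (ps.getD (n + 1) []) = ' ' := by
      unfold pvSep; exact if_neg (fun hab => hA hab.1)
    rw [hsep]

theorem pvF_getD (parts : List (List Char)) (k j : Nat) (hj : k ≤ j) :
    (pvF parts k).getD j [] = parts.getD j [] := by
  unfold pvF
  rw [List.getD_eq_getElem?_getD, List.getD_eq_getElem?_getD, List.getElem?_mapIdx]
  cases hp : parts[j]? with
  | none => rfl
  | some p => simp [Nat.not_lt.mpr hj]

theorem pvFoldA (parts : List (List Char)) (k : Nat) (hk : k + 1 ≤ parts.length) :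
    (PySem.List.pyRange 0 (k : Int) 1).foldl pvLoopBodyA parts = pvF parts k := by
  induction k with
  | zero =>
    rw [PySem.List.pyRange_one_eq_nil (by omega)]
    simp only [List.foldl_nil, pvF]
    apply List.ext_getElem (by simp)
    intro j h1 h2
    simp
  | succ k ih =>
    have hk' : k + 1 ≤ parts.length := by omega
    have hcast : ((k + 1 : Nat) : Int) = (k : Int) + 1 := by omega
    rw [hcast, PySem.List.pyRange_one_succ_right (by omega), List.foldl_append]
    rw [ih hk']
    simp only [List.foldl_cons, List.foldl_nil]
    rw [pvBodyA (pvF parts k) k]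
    rw [pvF_getD parts k k (le_refl k), pvF_getD parts k (k + 1) (by omega)]
    apply List.ext_getElem (by simp [pvF])
    intro j h1 h2
    have hjlen : j < parts.length := by simpa [pvF] using h2
    simp only [pvF] at h1 ⊢
    rw [List.getElem_set]
    by_cases hjk : k = j
    · subst hjk
      rw [if_pos rfl, List.getElem_mapIdx, if_pos (by omega)]
      rw [List.getD_eq_getElem?_getD, List.getElem?_eq_getElem hjlen]
      rfl
    · rw [if_neg hjk]
      simp only [List.getElem_mapIdx]
      by_cases hjk2 : j < k
      · rw [if_pos hjk2, if_pos (by omega)]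
      · rw [if_neg hjk2, if_neg (by omega)]

theorem pvFmax (parts : List (List Char)) (h : parts ≠ []) :
    pvF parts (parts.length - 1) = pvDec parts := by
  match parts with
  | [p] => simp [pvF, pvDec]
  | p :: q :: rest =>
    have ihres := pvFmax (q :: rest) (by simp)
    unfold pvF
    rw [List.mapIdx_cons]
    have hhead : (if 0 < (p :: q :: rest).length - 1 then
        p ++ [pvSep ((p :: q :: rest).getD 0 []) ((p :: q :: rest).getD 1 [])] else p) =
        p ++ [pvSep p q] := by
      simp
    have htail : List.mapIdx (fun i p' => if i + 1 < (p :: q :: rest).length - 1 then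
        p' ++ [pvSep ((p :: q :: rest).getD (i + 1) []) ((p :: q :: rest).getD (i + 1 + 1) [])] else p') (q :: rest) =
        pvF (q :: rest) ((q :: rest).length - 1) := by
      unfold pvF
      congr 1
      funext i p'
      rw [List.getD_cons_succ, List.getD_cons_succ]
      by_cases hi : i < (q :: rest).length - 1
      · rw [if_pos (by simp at hi ⊢; omega), if_pos hi]
      · rw [if_neg (by simp at hi ⊢; omega), if_neg hi]
    rw [hhead, htail, ihres]
    rfl

-- L4: A's loop computes pvDec
theorem pvLoop_eq (parts : List (List Char)) (h : parts ≠ []) :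
    (PySem.List.pyRange 0 ((parts.length : Int) - 1) 1).foldl pvLoopBodyA parts = pvDec parts := by
  have hl : 1 ≤ parts.length := List.length_pos_iff.mpr h
  have hcast : ((parts.length : Int) - 1) = ((parts.length - 1 : Nat) : Int) := by omega
  rw [hcast, pvFoldA parts (parts.length - 1) (by omega), pvFmax parts h]

-- L5: join of pvDec is pvNmap of the glued string
theorem pvNmap_no_comma (a : Option Char) (l : List Char) (h : ',' ∉ l) : pvNmap a l = l := by
  induction l generalizing a with
  | nil => rfl
  | cons c cs ih =>
    simp only [List.mem_cons, not_or] at h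
    simp [pvNmap, Ne.symm h.1, ih _ h.2]

theorem pvNmap_congr (a b : Option Char) (l : List Char) (h : pvDig a = pvDig b) :
    pvNmap a l = pvNmap b l := by
  cases l with
  | nil => rfl
  | cons c cs => simp [pvNmap, h]

theorem pvNmap_prefix (p : List Char) (l : List Char) (a : Option Char) (h : ',' ∉ p) :
    pvNmap a (p ++ l) = p ++ pvNmap (if p.isEmpty then a else p.getLast?) l := by
  induction p generalizing a with
  | nil => simp
  | cons x xs ih =>
    simp only [List.mem_cons, not_or] at h
    have hx : ¬ x = ',' := fun e => h.1 e.symm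
    simp only [List.cons_append, pvNmap, if_neg hx, List.isEmpty_cons]
    rw [ih _ h.2]
    congr 2
    cases hxs : xs with
    | nil => simp
    | cons y ys => subst hxs; simp [List.getLast?_cons_cons]

theorem pvGlue_head_dig (q : List Char) (rest : List (List Char)) :
    pvDig (pvGlue (q :: rest)).head? = pvDig q.head? := by
  cases rest with
  | nil => rfl
  | cons r rs =>
    cases q with
    | nil => simp [pvGlue, pvDig]
    | cons x xs => simp [pvGlue, pvDig]

theorem pvDec_ne_nil (parts : List (List Char)) (h : parts ≠ []) : pvDec parts ≠ [] := by
  match parts with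
  | [p] => simp [pvDec]
  | p :: q :: rest => simp [pvDec]

theorem pvJoin_dec (parts : List (List Char)) (h : parts ≠ []) (hc : ∀ p ∈ parts, ',' ∉ p) :
    PySem.Chars.join [] (pvDec parts) = pvNmap none (pvGlue parts) := by
  match parts with
  | [p] =>
    simp only [pvDec, pvGlue, PySem.Chars.join_singleton]
    exact (pvNmap_no_comma none p (hc p (by simp))).symm
  | p :: q :: rest =>
    have hp : ',' ∉ p := hc p (by simp)
    have ihres := pvJoin_dec (q :: rest) (by simp) (fun r hr => hc r (List.mem_cons_of_mem p hr))
    cases hd : pvDec (q :: rest) with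
    | nil => exact absurd hd (pvDec_ne_nil _ (by simp))
    | cons d ds =>
      have lhs : PySem.Chars.join [] (pvDec (p :: q :: rest)) =
          (p ++ [pvSep p q]) ++ PySem.Chars.join [] (pvDec (q :: rest)) := by
        simp only [pvDec, hd, PySem.Chars.join_cons_cons]
        simp
      rw [lhs, ihres]
      have rhs : pvNmap none (pvGlue (p :: q :: rest)) =
          p ++ pvNmap (if p.isEmpty then (none : Option Char) else p.getLast?) (',' :: pvGlue (q :: rest)) := by
        simp only [pvGlue]
        exact pvNmap_prefix p _ none hp
      rw [rhs]
      have hlast : (if p.isEmpty then (none : Option Char) else p.getLast?) = p.getLast? := by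
        cases p <;> simp
      rw [hlast]
      simp only [pvNmap]
      rw [pvNmap_congr (some ',') none _ (by simp [pvDig])]
      rw [pvGlue_head_dig q rest]
      simp [pvSep]

-- main core equality
theorem pvCore (s : List Char) :
    (if ',' ∈ s then
      String.ofList (PySem.Chars.join []
        ((PySem.List.pyRange 0 (((PySem.Chars.splitOn s [',']).length : Int) - 1) 1).foldl
          pvLoopBodyA (PySem.Chars.splitOn s [','])))
     else String.ofList s) = String.ofList ((PySem.List.enumerate s).foldl (pvLoopBodyB s) []) := by
  have hB : (PySem.List.enumerate s).foldl (pvLoopBodyB s) [] = pvNmap none s := by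
    rw [pvFoldB s]
    simpa using pvEnumMap s []
  rw [hB]
  by_cases hmem : ',' ∈ s
  · rw [if_pos hmem, pvSplitOn_eq, pvLoop_eq _ (pvSplit1_ne_nil s),
      pvJoin_dec _ (pvSplit1_ne_nil s) (pvSplit1_no_comma s), pvGlue_split1]
  · rw [if_neg hmem, pvNmap_no_comma none s hmem]

-- ===== VERDICT (by name: the statement is the Claim_ definition above) =====
theorem replace_commas_spec : Claim_equal_replace_commas := by
  intro text _ _
  simp only [Spec_replace_commas, replace_commas, replace_commas_alt]
  exact pvCore _
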